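-- pv_equiv track=rewrite | github.com/rwestein/aoc2024 | dec21.py | filter_shortest_sequences
-- ===== SOURCE A (Python) =====
-- def filter_shortest_sequences(sequences: set) -> set:
--     filtered_sequences = set()
--     sequence_length = None
--     for sequence in sequences:
--         if sequence_length is None or sequence_length == len(sequence):
--             filtered_sequences.add(sequence)
--             sequence_length = len(sequence)
--         elif sequence_length > len(sequence):
--             filtered_sequences = set([sequence])
--             sequence_length = len(sequence)
--     return filtered_sequences
-- ===== SOURCE B (Python) =====
-- def filter_shortest_sequences(sequences: set) -> set:
--     if not sequences:
--         return set()
--     m = min(len(s) for s in sequences)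
--     return {s for s in sequences if len(s) == m}
-- ===== Notes on version B (the rewrite author's own statement) =====
-- stated objective: simpler
-- what changed: Replaces the single incremental running-minimum loop with rebuilding/resetting of the result set by two plain passes: compute the minimum length once, then filter the elements of that length (empty input guarded first).
import Mathlib
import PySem

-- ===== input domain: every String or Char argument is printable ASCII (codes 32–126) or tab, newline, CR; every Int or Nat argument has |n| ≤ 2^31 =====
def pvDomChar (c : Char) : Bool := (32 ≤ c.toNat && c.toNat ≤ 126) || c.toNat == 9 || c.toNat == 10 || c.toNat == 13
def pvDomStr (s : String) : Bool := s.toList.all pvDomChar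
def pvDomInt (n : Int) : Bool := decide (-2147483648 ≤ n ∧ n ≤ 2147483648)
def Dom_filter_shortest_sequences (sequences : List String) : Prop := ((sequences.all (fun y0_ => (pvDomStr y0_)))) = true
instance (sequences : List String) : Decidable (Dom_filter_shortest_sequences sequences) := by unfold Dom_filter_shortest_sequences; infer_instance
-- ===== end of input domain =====

-- B replaces A's single incremental running-minimum pass (reset/extend a set while scanning)
-- by two plain passes: compute the minimum length once, then keep the elements of that length (simpler).


-- ===== PORT A =====
-- one step of A's loop body: state = (filtered_sequences, sequence_length)
def pvStepA (st : PySem.Set String × Option Int) (sequence : String) : PySem.Set String × Option Int :=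
  match st with
  | (filtered, none) =>
      (PySem.Set.add filtered sequence, some (PySem.Str.len sequence))
  | (filtered, some m) =>
      if m = PySem.Str.len sequence then
        (PySem.Set.add filtered sequence, some (PySem.Str.len sequence))
      else if PySem.Str.len sequence < m then
        (PySem.Set.ofList [sequence], some (PySem.Str.len sequence))
      else (filtered, some m)

def filter_shortest_sequences (sequences : List String) : List String :=
  (sequences.foldl pvStepA (PySem.Set.empty, none)).1

-- ===== PORT B =====
def filter_shortest_sequences_alt (sequences : List String) : List String :=
  match sequences with
  | [] => PySem.Set.empty
  | x :: xs =>
      match PySem.List.min? ((x :: xs).map PySem.Str.len) (fun v => v) with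
      | none => PySem.Set.empty   -- unreachable: the list is nonempty
      | some m => PySem.Set.ofList ((x :: xs).filter (fun s => PySem.Str.len s == m))

-- ===== PRECONDITION & SPEC =====
def Spec_filter_shortest_sequences (sequences : List String) (out : List String) : Prop := out = filter_shortest_sequences_alt sequences
instance (sequences : List String) (out : List String) : Decidable (Spec_filter_shortest_sequences sequences out) := by unfold Spec_filter_shortest_sequences; infer_instance

-- ===== CLAIM (what is proved, stated in full; the proofs are below) =====
def Claim_equal_filter_shortest_sequences : Prop := ∀ (sequences : List String), Dom_filter_shortest_sequences sequences → Spec_filter_shortest_sequences sequences (filter_shortest_sequences sequences)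

-- ===== LEMMAS AND PROOFS =====

-- the running minimum of the lengths, seeded with m
def pvMin (m : Int) (xs : List String) : Int :=
  (xs.map (fun s => (s.length : Int))).foldl min m

lemma pvMin_nil (m : Int) : pvMin m [] = m := rfl

lemma pvMin_cons (m : Int) (x : String) (xs : List String) :
    pvMin m (x :: xs) = pvMin (min m (x.length : Int)) xs := rfl

lemma pvMin_le (xs : List String) : ∀ m : Int, pvMin m xs ≤ m := by
  induction xs with
  | nil => intro m; simp [pvMin_nil]
  | cons x xs ih =>
    intro m
    calc pvMin m (x :: xs) ≤ min m (x.length : Int) := by rw [pvMin_cons]; exact ih _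
    _ ≤ m := min_le_left _ _

lemma ofList_append_singleton (l : List String) (x : String) :
    PySem.Set.ofList (l ++ [x]) = PySem.Set.add (PySem.Set.ofList l) x := by
  simp [PySem.Set.ofList_eq_foldl, List.foldl_append]

-- one step of A's loop, with the branch tests spelled out on lengths
lemma stepA_eq (l : PySem.Set String) (m : Int) (x : String) :
    pvStepA (l, some m) x =
      if m = (x.length : Int) then (PySem.Set.add l x, some (x.length : Int))
      else if (x.length : Int) < m then (PySem.Set.ofList [x], some (x.length : Int))
      else (l, some m) := by
  simp [pvStepA]

-- A's loop from state (ofList l1, some m): the result is the min-length elements,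
-- prefixed with l1 exactly when no strictly shorter element occurs.
lemma foldA_some (xs : List String) : ∀ (m : Int) (l1 : List String),
    (xs.foldl pvStepA (PySem.Set.ofList l1, some m)).1 =
      (if pvMin m xs = m then
        PySem.Set.ofList (l1 ++ xs.filter (fun s => (s.length : Int) == pvMin m xs))
      else
        PySem.Set.ofList (xs.filter (fun s => (s.length : Int) == pvMin m xs))) := by
  induction xs with
  | nil => intro m l1; simp [pvMin_nil]
  | cons x xs ih =>
    intro m l1
    rw [List.foldl_cons, stepA_eq, pvMin_cons]
    rcases lt_trichotomy ((x.length : Int)) m with hlt | heq | hgt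
    · -- strictly shorter: reset
      rw [if_neg (by omega), if_pos hlt, (by omega : min m (x.length : Int) = (x.length : Int))]
      have hxl : PySem.Set.ofList [x] = PySem.Set.ofList ([x] : List String) := rfl
      rw [ih ((x.length : Int)) [x]]
      have hle : pvMin ((x.length : Int)) xs ≤ (x.length : Int) := pvMin_le xs _
      rw [if_neg (by omega : ¬ pvMin ((x.length : Int)) xs = m)]
      by_cases hc : pvMin ((x.length : Int)) xs = (x.length : Int)
      · rw [if_pos hc]
        simp [hc]
      · rw [if_neg hc]
        simp [Ne.symm hc]
    · -- equal length: add x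
      subst heq
      rw [if_pos rfl, ← ofList_append_singleton, ih _ (l1 ++ [x]), min_self]
      by_cases hc : pvMin ((x.length : Int)) xs = (x.length : Int)
      · rw [if_pos hc, if_pos hc]
        simp [hc, List.append_assoc]
      · rw [if_neg hc, if_neg hc]
        simp [Ne.symm hc]
    · -- strictly longer: skip
      rw [if_neg (by omega), if_neg (by omega), ih m l1,
          (by omega : min m (x.length : Int) = m)]
      have hle : pvMin m xs ≤ m := pvMin_le xs _
      have hne : ¬ ((x.length : Int) == pvMin m xs) = true := by simp; omega
      by_cases hc : pvMin m xs = m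
      · rw [if_pos hc, if_pos hc]
        simp [hne]
      · rw [if_neg hc, if_neg hc]
        simp [hne]

-- ===== VERDICT (by name: the statement is the Claim_ definition above) =====
theorem filter_shortest_sequences_spec : Claim_equal_filter_shortest_sequences := by
  intro sequences _
  unfold Spec_filter_shortest_sequences
  match sequences with
  | [] => rfl
  | x :: xs =>
    have hstep : pvStepA (PySem.Set.empty, none) x
        = (PySem.Set.ofList [x], some (PySem.Str.len x)) := by
      simp [pvStepA, PySem.Set.empty, PySem.Set.add, PySem.Set.ofList, PySem.Set.contains]
    have hmin : PySem.List.min? ((x :: xs).map PySem.Str.len) (fun v => v)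
        = some ((xs.map PySem.Str.len).foldl min (PySem.Str.len x)) := by
      rw [List.map_cons, PySem.List.min?_id_cons]
    have hmap : List.map PySem.Str.len xs = List.map (fun s => ((s.length : Nat) : Int)) xs :=
      List.map_congr_left (fun a _ => by simp [PySem.Str.len_eq])
    have hmm : (xs.map PySem.Str.len).foldl min (PySem.Str.len x) = pvMin ((x.length : Int)) xs := by
      unfold pvMin; rw [hmap]; simp [PySem.Str.len_eq]
    rw [filter_shortest_sequences, List.foldl_cons, hstep]
    simp only [PySem.Str.len_eq, String.length_toList]
    rw [foldA_some xs ((x.length : Int)) [x],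
        filter_shortest_sequences_alt, hmin, hmm]
    simp only [PySem.Str.len_eq, String.length_toList]
    by_cases hc : pvMin ((x.length : Int)) xs = (x.length : Int)
    · rw [if_pos hc]
      simp [hc]
    · rw [if_neg hc]
      simp [Ne.symm hc]
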